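-- pv_equiv track=rewrite | github.com/Wulfic/Cicada3301 | Tools/analyze_p20_shift2.py | find_english_words
-- ===== SOURCE A (Python) =====
-- ENGLISH_WORDS = set([
--     'THE', 'BE', 'TO', 'OF', 'AND', 'A', 'IN', 'THAT', 'HAVE', 'I', 'IT', 'FOR', 'NOT',
--     'ON', 'WITH', 'HE', 'AS', 'YOU', 'DO', 'AT', 'THIS', 'BUT', 'HIS', 'BY', 'FROM',
--     'THEY', 'WE', 'SAY', 'HER', 'SHE', 'OR', 'AN', 'WILL', 'MY', 'ONE', 'ALL', 'WOULD',
--     'THERE', 'THEIR', 'WHAT', 'SO', 'UP', 'OUT', 'IF', 'ABOUT', 'WHO', 'GET', 'WHICH',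
--     'GO', 'ME', 'WHEN', 'MAKE', 'CAN', 'LIKE', 'TIME', 'NO', 'JUST', 'HIM', 'KNOW',
--     'TAKE', 'PEOPLE', 'INTO', 'YEAR', 'YOUR', 'GOOD', 'SOME', 'COULD', 'THEM', 'SEE',
--     'OTHER', 'THAN', 'THEN', 'NOW', 'LOOK', 'ONLY', 'COME', 'ITS', 'OVER', 'THINK',
--     'ALSO', 'BACK', 'AFTER', 'USE', 'TWO', 'HOW', 'OUR', 'WORK', 'FIRST', 'WELL',
--     'WAY', 'EVEN', 'NEW', 'WANT', 'BECAUSE', 'ANY', 'THESE', 'GIVE', 'DAY', 'MOST',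
--     'US', 'IS', 'AM', 'ARE', 'WAS', 'WERE', 'BEEN', 'BEING', 'EACH', 'FEW', 'THOSE',
--     'MUST', 'SELF', 'OWN', 'SAME', 'TELL', 'NEED', 'FEEL', 'HIGH', 'OLD', 'GREAT',
--     'NAME', 'THING', 'MAN', 'WORLD', 'LIFE', 'HAND', 'PART', 'CHILD', 'EYE', 'WOMAN',
--     'LONE', 'PATH', 'TRUTH', 'LIGHT', 'DARK', 'SOUL', 'MIND', 'BODY', 'HEART', 'DEATH',
--     'DEAD', 'LIVE', 'LEARN', 'TEACH', 'SHOW', 'WALK', 'RUN', 'FALL', 'RISE',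
--     'EODE', 'SEFA', 'DEOR', 'WEAN', 'EORL', 'WYRD', 'FRITH',
-- ])
--
-- def find_english_words(text):
--     found = []
--     for word in ENGLISH_WORDS:
--         if len(word) >= 3:
--             idx = 0
--             while True:
--                 idx = text.find(word, idx)
--                 if idx == -1:
--                     break
--                 found.append((idx, word))
--                 idx += 1
--     return sorted(found)
-- ===== SOURCE B (Python) =====
-- # Word table kept as comma-separated strings, filtered to length >= 3 and probed
-- # by slicing: a single pass over text positions tries each candidate word length
-- # with a set lookup, emitting pairs already in sorted order (no final sort).
-- _CHUNKS = (
--     "THE,BE,TO,OF,AND,A,IN,THAT,HAVE,I,IT,FOR,NOT,ON,WITH,HE,AS,YOU,DO,AT,THIS,BUT,HIS,BY,FROM,THEY,WE,SAY,HER,SHE",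
--     "OR,AN,WILL,MY,ONE,ALL,WOULD,THERE,THEIR,WHAT,SO,UP,OUT,IF,ABOUT,WHO,GET,WHICH,GO,ME,WHEN,MAKE,CAN,LIKE,TIME,NO",
--     "JUST,HIM,KNOW,TAKE,PEOPLE,INTO,YEAR,YOUR,GOOD,SOME,COULD,THEM,SEE,OTHER,THAN,THEN,NOW,LOOK,ONLY,COME,ITS,OVER",
--     "THINK,ALSO,BACK,AFTER,USE,TWO,HOW,OUR,WORK,FIRST,WELL,WAY,EVEN,NEW,WANT,BECAUSE,ANY,THESE,GIVE,DAY,MOST,US,IS",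
--     "AM,ARE,WAS,WERE,BEEN,BEING,EACH,FEW,THOSE,MUST,SELF,OWN,SAME,TELL,NEED,FEEL,HIGH,OLD,GREAT,NAME,THING,MAN",
--     "WORLD,LIFE,HAND,PART,CHILD,EYE,WOMAN,LONE,PATH,TRUTH,LIGHT,DARK,SOUL,MIND,BODY,HEART,DEATH,DEAD,LIVE,LEARN",
--     "TEACH,SHOW,WALK,RUN,FALL,RISE,EODE,SEFA,DEOR,WEAN,EORL,WYRD,FRITH",
-- )
--
-- _DICT = set(w for ws in _CHUNKS for w in ws.split(',') if len(w) >= 3)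
-- _LENGTHS = sorted({len(w) for w in _DICT})
--
-- def find_english_words(text):
--     found = []
--     for i in range(len(text)):
--         for L in _LENGTHS:
--             w = text[i:i + L]
--             if len(w) == L and w in _DICT:
--                 found.append((i, w))
--     return found
-- ===== Notes on version B (the rewrite author's own statement) =====
-- stated objective: alternative
-- what changed: A runs str.find repeatedly for every dictionary word over the whole text and sorts the pairs at the end; B stores the word table as comma-separated strings split into a length-filtered set at load time and makes one pass over text positions, slicing each candidate word length and testing set membership, emitting the pairs already in sorted order with no final sort.
import Mathlib
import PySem

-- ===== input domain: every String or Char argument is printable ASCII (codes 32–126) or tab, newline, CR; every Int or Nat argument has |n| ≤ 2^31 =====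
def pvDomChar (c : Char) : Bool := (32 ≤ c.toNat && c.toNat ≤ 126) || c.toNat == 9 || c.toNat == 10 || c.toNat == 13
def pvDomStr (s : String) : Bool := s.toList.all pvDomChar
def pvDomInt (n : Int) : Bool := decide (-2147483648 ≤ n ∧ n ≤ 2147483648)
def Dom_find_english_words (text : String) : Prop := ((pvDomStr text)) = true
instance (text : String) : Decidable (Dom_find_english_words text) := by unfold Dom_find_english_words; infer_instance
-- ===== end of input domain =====

-- B replaces A's per-word str.find scans (plus a final sort) with a single position scan
-- over the text, probing a length-filtered set per candidate word length; its word table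
-- is kept as comma-separated chunk strings split at load time, and the pairs come out
-- already in sorted order.

-- ===== PORT A =====
def pvWordList : List String := ["THE", "BE", "TO", "OF", "AND", "A", "IN", "THAT", "HAVE", "I", "IT", "FOR", "NOT", "ON", "WITH", "HE", "AS", "YOU", "DO", "AT", "THIS", "BUT", "HIS", "BY", "FROM", "THEY", "WE", "SAY", "HER", "SHE", "OR", "AN", "WILL", "MY", "ONE", "ALL", "WOULD", "THERE", "THEIR", "WHAT", "SO", "UP", "OUT", "IF", "ABOUT", "WHO", "GET", "WHICH", "GO", "ME", "WHEN", "MAKE", "CAN", "LIKE", "TIME", "NO", "JUST", "HIM", "KNOW", "TAKE", "PEOPLE", "INTO", "YEAR", "YOUR", "GOOD", "SOME", "COULD", "THEM", "SEE", "OTHER", "THAN", "THEN", "NOW", "LOOK", "ONLY", "COME", "ITS", "OVER", "THINK", "ALSO", "BACK", "AFTER", "USE", "TWO", "HOW", "OUR", "WORK", "FIRST", "WELL", "WAY", "EVEN", "NEW", "WANT", "BECAUSE", "ANY", "THESE", "GIVE", "DAY", "MOST", "US", "IS", "AM", "ARE", "WAS", "WERE", "BEEN", "BEING", "EACH", "FEW",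 "THOSE", "MUST", "SELF", "OWN", "SAME", "TELL", "NEED", "FEEL", "HIGH", "OLD", "GREAT", "NAME", "THING", "MAN", "WORLD", "LIFE", "HAND", "PART", "CHILD", "EYE", "WOMAN", "LONE", "PATH", "TRUTH", "LIGHT", "DARK", "SOUL", "MIND", "BODY", "HEART", "DEATH", "DEAD", "LIVE", "LEARN", "TEACH", "SHOW", "WALK", "RUN", "FALL", "RISE", "EODE", "SEFA", "DEOR", "WEAN", "EORL", "WYRD", "FRITH"]

def ENGLISH_WORDS : PySem.Set String := PySem.Set.ofList pvWordList

-- A's inner 'while True: idx = text.find(word, idx); …; idx += 1' loop; fuel (text length + 1)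
-- is only a totality guard: the found index strictly increases each round.
def findLoopA (text word : String) : Int → Nat → List (Int × String)
  | _, 0 => []
  | idx, fuel + 1 =>
    let j := PySem.Str.findFrom text word idx
    if j = -1 then []
    else (j, word) :: findLoopA text word (j + 1) fuel

-- A's 'found' accumulator after the for-loop over ENGLISH_WORDS
def pvFoundA (text : String) : List (Int × String) :=
  ENGLISH_WORDS.foldl
    (fun acc word =>
      if 3 ≤ PySem.Str.len word then acc ++ findLoopA text word 0 (text.toList.length + 1)
      else acc) []

def find_english_words (text : String) : List (Int × String) :=
  PySem.List.sorted2 (pvFoundA text) Prod.fst Prod.snd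

-- ===== PORT B =====
-- _CHUNKS: the word table as comma-separated strings (line-wrapped source form)
def pvChunksB : List String := ["THE,BE,TO,OF,AND,A,IN,THAT,HAVE,I,IT,FOR,NOT,ON,WITH,HE,AS,YOU,DO,AT,THIS,BUT,HIS,BY,FROM,THEY,WE,SAY,HER,SHE", "OR,AN,WILL,MY,ONE,ALL,WOULD,THERE,THEIR,WHAT,SO,UP,OUT,IF,ABOUT,WHO,GET,WHICH,GO,ME,WHEN,MAKE,CAN,LIKE,TIME,NO", "JUST,HIM,KNOW,TAKE,PEOPLE,INTO,YEAR,YOUR,GOOD,SOME,COULD,THEM,SEE,OTHER,THAN,THEN,NOW,LOOK,ONLY,COME,ITS,OVER", "THINK,ALSO,BACK,AFTER,USE,TWO,HOW,OUR,WORK,FIRST,WELL,WAY,EVEN,NEW,WANT,BECAUSE,ANY,THESE,GIVE,DAY,MOST,US,IS", "AM,ARE,WAS,WERE,BEEN,BEING,EACH,FEW,THOSE,MUST,SELF,OWN,SAME,TELL,NEED,FEEL,HIGH,OLD,GREAT,NAME,THING,MAN", "WORLD,LIFE,HAND,PART,CHILD,EYE,WOMAN,LONE,PATH,TRUTH,LIGHT,DARK,SOUL,MIND,BODY,HEART,DEATH,DEAD,LIVE,LEARN",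 "TEACH,SHOW,WALK,RUN,FALL,RISE,EODE,SEFA,DEOR,WEAN,EORL,WYRD,FRITH"]

-- _DICT = set(w for ws in _CHUNKS for w in ws.split(',') if len(w) >= 3)
def pvDictB : PySem.Set String :=
  PySem.Set.ofList
    (pvChunksB.flatMap
      (fun ws => ((PySem.Str.split? ws ",").getD []).filter
        (fun w => decide (3 ≤ PySem.Str.len w))))

-- _LENGTHS = sorted({len(w) for w in _DICT})
def pvLengthsB : List Int :=
  PySem.List.sorted (PySem.Set.ofList (List.map PySem.Str.len pvDictB)) (fun x => x)

-- w = text[i:i+L]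
def pvCandB (text : String) (i L : Int) : String :=
  PySem.Str.slice text (some i) (some (i + L))

def find_english_words_alt (text : String) : List (Int × String) :=
  (PySem.List.pyRange 0 (PySem.Str.len text)).foldl
    (fun acc i =>
      pvLengthsB.foldl
        (fun acc L =>
          if (PySem.Str.len (pvCandB text i L) == L)
              && PySem.Set.contains pvDictB (pvCandB text i L) then
            acc ++ [(i, pvCandB text i L)]
          else acc) acc) []

-- ===== PRECONDITION & SPEC =====
def Spec_find_english_words (text : String) (out : List (Int × String)) : Prop := out = find_english_words_alt text
instance (text : String) (out : List (Int × String)) : Decidable (Spec_find_english_words text out) := by unfold Spec_find_english_words; infer_instance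

-- ===== CLAIM (what is proved, stated in full; the proofs are below) =====
def Claim_equal_find_english_words : Prop := ∀ (text : String), Dom_find_english_words text → Spec_find_english_words text (find_english_words text)

-- ===== LEMMAS AND PROOFS =====

-- B's word table, split and length-filtered, is exactly A's word list length-filtered
set_option maxRecDepth 200000 in
set_option maxHeartbeats 1600000 in
theorem pvWordsB_eq :
    pvChunksB.flatMap
      (fun ws => ((PySem.Str.split? ws ",").getD []).filter
        (fun w => decide (3 ≤ PySem.Str.len w)))
    = pvWordList.filter (fun w => decide (3 ≤ PySem.Str.len w)) := by decide

theorem pvDictB_mem (w : String) :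
    w ∈ pvDictB ↔ w ∈ ENGLISH_WORDS ∧ 3 ≤ PySem.Str.len w := by
  unfold pvDictB
  rw [PySem.Set.mem_ofList, pvWordsB_eq, List.mem_filter]
  unfold ENGLISH_WORDS
  rw [PySem.Set.mem_ofList]
  simp

theorem pvLengthsB_mem (L : Int) :
    L ∈ pvLengthsB ↔ ∃ w ∈ ENGLISH_WORDS, 3 ≤ PySem.Str.len w ∧ L = PySem.Str.len w := by
  unfold pvLengthsB
  rw [PySem.List.mem_sorted, PySem.Set.mem_ofList]
  simp only [List.mem_map]
  constructor
  · rintro ⟨w, hw, rfl⟩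
    obtain ⟨hwE, h3⟩ := (pvDictB_mem w).mp hw
    exact ⟨w, hwE, h3, rfl⟩
  · rintro ⟨w, hwE, h3, rfl⟩
    exact ⟨w, (pvDictB_mem w).mpr ⟨hwE, h3⟩, rfl⟩

-- occurrence predicate both found-lists realise
def pvOcc (text : String) (p : Int × String) : Prop :=
  ∃ j : Nat, p.1 = (j : Int) ∧ p.2 ∈ ENGLISH_WORDS ∧ 3 ≤ p.2.toList.length ∧
    p.2.toList <+: text.toList.drop j

theorem pv_lex_of_prefix : ∀ (l1 l2 : List Char), l1 <+: l2 → l1 ≠ l2 → List.Lex (· < ·) l1 l2 := by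
  intro l1
  induction l1 with
  | nil =>
    intro l2 _ hne
    cases l2 with
    | nil => exact absurd rfl hne
    | cons a t => exact List.Lex.nil
  | cons a t ih =>
    intro l2 hp hne
    cases l2 with
    | nil => simp at hp
    | cons b t2 =>
      rw [List.cons_prefix_cons] at hp
      obtain ⟨rfl, hp⟩ := hp
      exact List.Lex.cons (ih t2 hp (fun h => hne (by rw [h])))

theorem pv_str_lt_of_prefix (s t : String) (h : s.toList <+: t.toList) (hne : s ≠ t) : s < t := by
  rw [String.lt_iff_toList_lt]
  exact pv_lex_of_prefix s.toList t.toList h (fun he => hne (String.toList_inj.mp he))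

theorem findLoopA_snd (text word : String) :
    ∀ (fuel : Nat) (idx : Int) (p : Int × String), p ∈ findLoopA text word idx fuel → p.2 = word := by
  intro fuel
  induction fuel with
  | zero => intro idx p hp; simp [findLoopA] at hp
  | succ fuel ih =>
    intro idx p hp
    rw [findLoopA] at hp
    by_cases hj : PySem.Str.findFrom text word idx = -1
    · rw [if_pos hj] at hp
      simp at hp
    · rw [if_neg hj] at hp
      rcases List.mem_cons.mp hp with rfl | hp
      · rfl
      · exact ih _ p hp

theorem findLoopA_mem (text word : String) (hw : word.toList ≠ []) :
    ∀ (fuel idx : Nat), idx ≤ text.toList.length → text.toList.length + 1 ≤ fuel + idx →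
    ∀ p : Int × String,
      (p ∈ findLoopA text word (idx : Int) fuel ↔
        ∃ j : Nat, idx ≤ j ∧ p = ((j : Int), word) ∧ word.toList <+: text.toList.drop j) := by
  intro fuel
  induction fuel with
  | zero => intro idx h1 h2 p; omega
  | succ fuel ih =>
    intro idx h1 h2 p
    rw [findLoopA]
    simp only [PySem.Str.findFrom_eq]
    by_cases hj : PySem.Chars.findFrom text.toList word.toList (idx : Int) none = -1
    · rw [if_pos hj]
      have hno : ¬ word.toList <:+: text.toList.drop idx :=
        (PySem.Chars.findFrom_natCast_eq_neg_one_iff text.toList word.toList idx h1).mp hj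
      simp only [List.not_mem_nil, false_iff]
      rintro ⟨j, hji, rfl, hpre⟩
      have hdd : text.toList.drop j = List.drop (j - idx) (text.toList.drop idx) := by
        rw [List.drop_drop]
        congr 1
        omega
      rw [hdd] at hpre
      exact hno (hpre.isInfix.trans (List.drop_suffix _ _).isInfix)
    · rw [if_neg hj]
      obtain ⟨hge, hpre, hmin⟩ :=
        PySem.Chars.findFrom_natCast_spec text.toList word.toList idx h1 hj
      set F := PySem.Chars.findFrom text.toList word.toList (idx : Int) none with hF
      have h0 : (0 : Int) ≤ F := le_trans (Int.ofNat_nonneg idx) hge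
      have hFn : F = ((F.toNat : Nat) : Int) := (Int.toNat_of_nonneg h0).symm
      have hlt : F.toNat < text.toList.length := by
        by_contra hcon
        rw [List.drop_eq_nil_iff.mpr (by omega)] at hpre
        exact hw (List.prefix_nil.mp hpre)
      have hcast : (F + 1 : Int) = ((F.toNat + 1 : Nat) : Int) := by omega
      rw [hcast]
      have hidxF : idx ≤ F.toNat := by omega
      have hrec := ih (F.toNat + 1) (by omega) (by omega) p
      constructor
      · intro hp
        rcases List.mem_cons.mp hp with rfl | hp
        · exact ⟨F.toNat, hidxF, by rw [← hFn], hpre⟩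
        · obtain ⟨j, hji, hpj, hprej⟩ := hrec.mp hp
          exact ⟨j, by omega, hpj, hprej⟩
      · rintro ⟨j, hji, rfl, hprej⟩
        by_cases hcmp : F.toNat + 1 ≤ j
        · exact List.mem_cons_of_mem _ (hrec.mpr ⟨j, hcmp, rfl, hprej⟩)
        · have hjF : j = F.toNat := by
            by_contra hne
            exact hmin j hji (by omega) hprej
          subst hjF
          exact List.mem_cons.mpr (Or.inl (by rw [← hFn]))

theorem findLoopA_fst_ge (text word : String) (hw : word.toList ≠ []) :
    ∀ (fuel idx : Nat), idx ≤ text.toList.length → text.toList.length + 1 ≤ fuel + idx →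
    ∀ p : Int × String, p ∈ findLoopA text word (idx : Int) fuel → (idx : Int) ≤ p.1 := by
  intro fuel
  induction fuel with
  | zero => intro idx h1 h2 p hp; omega
  | succ fuel ih =>
    intro idx h1 h2 p hp
    rw [findLoopA] at hp
    simp only [PySem.Str.findFrom_eq] at hp
    by_cases hj : PySem.Chars.findFrom text.toList word.toList (idx : Int) none = -1
    · rw [if_pos hj] at hp; simp at hp
    · rw [if_neg hj] at hp
      obtain ⟨hge, hpre, hmin⟩ :=
        PySem.Chars.findFrom_natCast_spec text.toList word.toList idx h1 hj
      set F := PySem.Chars.findFrom text.toList word.toList (idx : Int) none with hF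
      have h0 : (0 : Int) ≤ F := le_trans (Int.ofNat_nonneg idx) hge
      have hFn : F = ((F.toNat : Nat) : Int) := (Int.toNat_of_nonneg h0).symm
      have hlt : F.toNat < text.toList.length := by
        by_contra hcon
        rw [List.drop_eq_nil_iff.mpr (by omega)] at hpre
        exact hw (List.prefix_nil.mp hpre)
      rcases List.mem_cons.mp hp with rfl | hp
      · exact hge
      · have hcast : (F + 1 : Int) = ((F.toNat + 1 : Nat) : Int) := by omega
        rw [hcast] at hp
        have := ih (F.toNat + 1) (by omega) (by omega) p hp
        omega

theorem findLoopA_pairwise (text word : String) (hw : word.toList ≠ []) :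
    ∀ (fuel idx : Nat), idx ≤ text.toList.length → text.toList.length + 1 ≤ fuel + idx →
    (findLoopA text word (idx : Int) fuel).Pairwise (fun a b => a.1 < b.1) := by
  intro fuel
  induction fuel with
  | zero => intro idx h1 h2; simp [findLoopA]
  | succ fuel ih =>
    intro idx h1 h2
    rw [findLoopA]
    simp only [PySem.Str.findFrom_eq]
    by_cases hj : PySem.Chars.findFrom text.toList word.toList (idx : Int) none = -1
    · rw [if_pos hj]; simp
    · rw [if_neg hj]
      obtain ⟨hge, hpre, hmin⟩ :=
        PySem.Chars.findFrom_natCast_spec text.toList word.toList idx h1 hj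
      set F := PySem.Chars.findFrom text.toList word.toList (idx : Int) none with hF
      have h0 : (0 : Int) ≤ F := le_trans (Int.ofNat_nonneg idx) hge
      have hFn : F = ((F.toNat : Nat) : Int) := (Int.toNat_of_nonneg h0).symm
      have hlt : F.toNat < text.toList.length := by
        by_contra hcon
        rw [List.drop_eq_nil_iff.mpr (by omega)] at hpre
        exact hw (List.prefix_nil.mp hpre)
      have hcast : (F + 1 : Int) = ((F.toNat + 1 : Nat) : Int) := by omega
      rw [hcast]
      refine List.Pairwise.cons ?_ (ih (F.toNat + 1) (by omega) (by omega))
      intro b hb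
      have := findLoopA_fst_ge text word hw fuel (F.toNat + 1) (by omega) (by omega) b hb
      simp only []
      omega

theorem pvFoundA_eq_flatMap (text : String) :
    pvFoundA text = ENGLISH_WORDS.flatMap
      (fun w => if 3 ≤ PySem.Str.len w then findLoopA text w 0 (text.toList.length + 1) else []) := by
  unfold pvFoundA
  have hfun : (fun (acc : List (Int × String)) word =>
      if 3 ≤ PySem.Str.len word then acc ++ findLoopA text word 0 (text.toList.length + 1) else acc)
      = (fun acc word =>
          acc ++ (if 3 ≤ PySem.Str.len word then findLoopA text word 0 (text.toList.length + 1) else [])) := by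
    funext acc w
    split <;> simp
  rw [hfun, PySem.List.foldl_append_eq_flatMap]
  simp

theorem pvFoundA_mem (text : String) (p : Int × String) :
    p ∈ pvFoundA text ↔ pvOcc text p := by
  rw [pvFoundA_eq_flatMap, List.mem_flatMap]
  constructor
  · rintro ⟨w, hwE, hpf⟩
    by_cases h3 : 3 ≤ PySem.Str.len w
    · rw [if_pos h3] at hpf
      rw [PySem.Str.len_eq] at h3
      have h3' : 3 ≤ w.toList.length := by exact_mod_cast h3
      have hwne : w.toList ≠ [] := by intro h; rw [h] at h3'; simp at h3'
      have hm := findLoopA_mem text w hwne (text.toList.length + 1) 0 (Nat.zero_le _) (by omega) p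
      rw [Nat.cast_zero] at hm
      obtain ⟨j, _, rfl, hpre⟩ := hm.mp hpf
      exact ⟨j, rfl, hwE, h3', hpre⟩
    · rw [if_neg h3] at hpf
      simp at hpf
  · rintro ⟨j, hp1, hwE, h3, hpre⟩
    refine ⟨p.2, hwE, ?_⟩
    have h3L : 3 ≤ PySem.Str.len p.2 := by rw [PySem.Str.len_eq]; exact_mod_cast h3
    rw [if_pos h3L]
    have hwne : p.2.toList ≠ [] := by intro h; rw [h] at h3; simp at h3
    have hm := findLoopA_mem text p.2 hwne (text.toList.length + 1) 0 (Nat.zero_le _) (by omega) p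
    rw [Nat.cast_zero] at hm
    exact hm.mpr ⟨j, Nat.zero_le _, by rw [← hp1], hpre⟩

theorem pv_sndA (text : String) (w : String) (x : Int × String)
    (hx : x ∈ (if 3 ≤ PySem.Str.len w then findLoopA text w 0 (text.toList.length + 1) else [])) :
    x.2 = w := by
  by_cases h3 : 3 ≤ PySem.Str.len w
  · rw [if_pos h3] at hx
    exact findLoopA_snd text w _ _ x hx
  · rw [if_neg h3] at hx
    simp at hx

theorem pvFoundA_nodup (text : String) : (pvFoundA text).Nodup := by
  rw [pvFoundA_eq_flatMap, List.nodup_flatMap]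
  constructor
  · intro w hwE
    by_cases h3 : 3 ≤ PySem.Str.len w
    · rw [if_pos h3]
      rw [PySem.Str.len_eq] at h3
      have h3' : 3 ≤ w.toList.length := by exact_mod_cast h3
      have hwne : w.toList ≠ [] := by intro h; rw [h] at h3'; simp at h3'
      have hpw := findLoopA_pairwise text w hwne (text.toList.length + 1) 0 (Nat.zero_le _) (by omega)
      rw [Nat.cast_zero] at hpw
      refine hpw.imp ?_
      intro a b hab hEq
      rw [hEq] at hab
      exact lt_irrefl _ hab
    · rw [if_neg h3]
      exact List.nodup_nil
  · have hnd : (ENGLISH_WORDS : List String).Nodup := PySem.Set.nodup_ofList pvWordList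
    refine hnd.imp ?_
    intro a b hab x hx1 hx2
    exact hab (by rw [← pv_sndA text a x hx1, pv_sndA text b x hx2])

-- B-side block form
def pvBlockB (text : String) (i : Int) : List (Int × String) :=
  (pvLengthsB.filter (fun L =>
      (PySem.Str.len (pvCandB text i L) == L)
        && PySem.Set.contains pvDictB (pvCandB text i L))).map
    (fun L => (i, pvCandB text i L))

theorem pvFoundB_eq_flatMap (text : String) :
    find_english_words_alt text
      = (PySem.List.pyRange 0 (PySem.Str.len text)).flatMap (pvBlockB text) := by
  unfold find_english_words_alt
  have hfun : (fun (acc : List (Int × String)) i =>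
      pvLengthsB.foldl
        (fun acc L =>
          if (PySem.Str.len (pvCandB text i L) == L)
              && PySem.Set.contains pvDictB (pvCandB text i L) then
            acc ++ [(i, pvCandB text i L)]
          else acc) acc)
      = (fun acc i => acc ++ pvBlockB text i) := by
    funext acc i
    exact PySem.List.foldl_append_if _ _ pvLengthsB acc
  rw [hfun, PySem.List.foldl_append_eq_flatMap]
  simp

theorem pvCandB_toList (text : String) (k n : Nat) :
    (pvCandB text (k : Int) ((n : Nat) : Int)).toList = (text.toList.drop k).take n := by
  unfold pvCandB
  rw [PySem.Str.toList_slice, PySem.Chars.slice_eq_listSlice]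
  exact PySem.List.slice_natCast_add text.toList k n

theorem pvBlockB_mem (text : String) (i : Int) (p : Int × String) :
    p ∈ pvBlockB text i ↔ ∃ L ∈ pvLengthsB,
      PySem.Str.len (pvCandB text i L) = L ∧ pvCandB text i L ∈ pvDictB
        ∧ p = (i, pvCandB text i L) := by
  unfold pvBlockB
  simp only [List.mem_map, List.mem_filter, Bool.and_eq_true, beq_iff_eq, PySem.Set.contains_iff]
  constructor
  · rintro ⟨L, ⟨hL, hlen, hcont⟩, rfl⟩
    exact ⟨L, hL, hlen, hcont, rfl⟩
  · rintro ⟨L, hL, hlen, hcont, rfl⟩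
    exact ⟨L, ⟨hL, hlen, hcont⟩, rfl⟩

theorem pvBlockB_fst (text : String) (i : Int) (p : Int × String) (hp : p ∈ pvBlockB text i) :
    p.1 = i := by
  obtain ⟨L, _, _, _, rfl⟩ := (pvBlockB_mem text i p).mp hp
  rfl

theorem pvFoundB_mem (text : String) (p : Int × String) :
    p ∈ find_english_words_alt text ↔ pvOcc text p := by
  rw [pvFoundB_eq_flatMap, List.mem_flatMap]
  constructor
  · rintro ⟨i, hi, hblk⟩
    rw [PySem.List.pyRange_zero] at hi
    simp only [List.mem_map, List.mem_range] at hi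
    obtain ⟨k, hk, rfl⟩ := hi
    obtain ⟨L, hL, hlen, hcont, rfl⟩ := (pvBlockB_mem text _ _).mp hblk
    obtain ⟨w', _, h3', hLw⟩ := (pvLengthsB_mem L).mp hL
    obtain ⟨hwE, _⟩ := (pvDictB_mem _).mp hcont
    rw [PySem.Str.len_eq] at h3' hLw
    have h0L : 0 ≤ L := by omega
    have hLcast : ((L.toNat : Nat) : Int) = L := Int.toNat_of_nonneg h0L
    have htl : (pvCandB text (k : Int) L).toList = (text.toList.drop k).take L.toNat := by
      rw [← hLcast, pvCandB_toList]
      simp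
      omega
    rw [PySem.Str.len_eq, htl] at hlen
    refine ⟨k, rfl, hwE, ?_, ?_⟩
    · rw [htl]
      omega
    · rw [htl]
      exact List.take_prefix _ _
  · rintro ⟨j, hp1, hwE, h3, hpre⟩
    have hwne : p.2.toList ≠ [] := by intro h; rw [h] at h3; simp at h3
    have hjlt : j < text.toList.length := by
      by_contra hc
      rw [List.drop_eq_nil_iff.mpr (by omega)] at hpre
      exact hwne (List.prefix_nil.mp hpre)
    have hcand : pvCandB text (j : Int) ((p.2.toList.length : Nat) : Int) = p.2 := by
      apply String.toList_inj.mp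
      rw [pvCandB_toList]
      exact (List.prefix_iff_eq_take.mp hpre).symm
    have h3len : 3 ≤ PySem.Str.len p.2 := by rw [PySem.Str.len_eq]; exact_mod_cast h3
    refine ⟨(j : Int), ?_, ?_⟩
    · rw [PySem.List.pyRange_zero]
      simp only [List.mem_map, List.mem_range]
      refine ⟨j, ?_, rfl⟩
      rw [PySem.Str.len_eq]
      simpa using hjlt
    · refine (pvBlockB_mem _ _ _).mpr ⟨((p.2.toList.length : Nat) : Int), ?_, ?_, ?_, ?_⟩
      · exact (pvLengthsB_mem _).mpr ⟨p.2, hwE, h3len, (PySem.Str.len_eq _).symm⟩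
      · rw [hcand, PySem.Str.len_eq]
      · rw [hcand]
        exact (pvDictB_mem _).mpr ⟨hwE, h3len⟩
      · rw [hcand, ← hp1]

theorem pvFoundB_pairwise (text : String) :
    (find_english_words_alt text).Pairwise
      (fun a b => a.1 < b.1 ∨ (a.1 = b.1 ∧ a.2 < b.2)) := by
  rw [pvFoundB_eq_flatMap, List.pairwise_flatMap]
  constructor
  · intro i hi
    rw [PySem.List.pyRange_zero] at hi
    simp only [List.mem_map, List.mem_range] at hi
    obtain ⟨k, hk, rfl⟩ := hi
    unfold pvBlockB
    rw [List.pairwise_map]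
    have hpl : pvLengthsB.Pairwise (· < ·) := PySem.List.sorted_ofList_pairwise_lt _
    refine (hpl.filter _).imp_of_mem ?_
    intro L1 L2 hL1 hL2 hlt
    right
    refine ⟨rfl, ?_⟩
    rw [List.mem_filter, Bool.and_eq_true, beq_iff_eq] at hL1 hL2
    obtain ⟨_, hlen1, _⟩ := hL1
    obtain ⟨_, hlen2, _⟩ := hL2
    rw [PySem.Str.len_eq] at hlen1 hlen2
    have h01 : 0 ≤ L1 := by omega
    have h02 : 0 ≤ L2 := by omega
    have htl1 : (pvCandB text (k : Int) L1).toList = (text.toList.drop k).take L1.toNat := by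
      rw [← Int.toNat_of_nonneg h01, pvCandB_toList]
      simp
      omega
    have htl2 : (pvCandB text (k : Int) L2).toList = (text.toList.drop k).take L2.toNat := by
      rw [← Int.toNat_of_nonneg h02, pvCandB_toList]
      simp
      omega
    have hlen1' : (pvCandB text (k : Int) L1).toList.length = L1.toNat := by omega
    have hlen2' : (pvCandB text (k : Int) L2).toList.length = L2.toNat := by omega
    have hpre : (pvCandB text (k : Int) L1).toList <+: (pvCandB text (k : Int) L2).toList := by
      rw [htl1, htl2]
      have : ((text.toList.drop k).take L2.toNat).take L1.toNat
          = (text.toList.drop k).take L1.toNat := by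
        have hmin : min L1.toNat L2.toNat = L1.toNat := by omega
        rw [List.take_take, hmin]
      rw [← this]
      exact List.take_prefix _ _
    refine pv_str_lt_of_prefix _ _ hpre ?_
    intro hEq
    have hEq' : pvCandB text (k : Int) L1 = pvCandB text (k : Int) L2 := hEq
    have : (pvCandB text (k : Int) L1).toList.length = (pvCandB text (k : Int) L2).toList.length := by
      rw [hEq']
    omega
  · have hpr : (PySem.List.pyRange 0 (PySem.Str.len text)).Pairwise (· < ·) := by
      rw [PySem.List.pyRange_zero, List.pairwise_map]
      exact List.pairwise_lt_range.imp (fun h => by exact_mod_cast h)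
    refine hpr.imp_of_mem ?_
    intro i1 i2 _ _ hlt x hx y hy
    left
    rw [pvBlockB_fst text i1 x hx, pvBlockB_fst text i2 y hy]
    exact hlt

theorem pv_sorted2_eq_sorted_toLex (xs : List (Int × String)) :
    PySem.List.sorted2 xs Prod.fst Prod.snd
      = PySem.List.sorted xs (fun p => toLex p : Int × String → Lex (Int × String)) := by
  rw [PySem.List.sorted_eq_foldl_insertBy]
  unfold PySem.List.sorted2
  simp only [Bool.false_eq_true, if_false]
  congr 1
  funext acc x
  congr 1
  funext a b
  rcases lt_trichotomy a.1 b.1 with h | h | h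
  · simp [Prod.Lex.lt_iff, h]
  · simp [Prod.Lex.lt_iff, h, lt_irrefl]
  · simp only [Prod.Lex.lt_iff, ofLex_toLex]
    simp [not_lt_of_gt h, ne_of_gt h]
    exact fun hle => absurd h (not_lt_of_ge hle)

-- ===== VERDICT (by name: the statement is the Claim_ definition above) =====
theorem find_english_words_spec : Claim_equal_find_english_words := by
  intro text _
  show find_english_words text = find_english_words_alt text
  have hlex := pvFoundB_pairwise text
  have hndB : (find_english_words_alt text).Nodup := by
    refine hlex.imp ?_
    intro a b h hab
    subst hab
    rcases h with h | ⟨_, h⟩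
    · exact lt_irrefl _ h
    · exact lt_irrefl _ h
  have hperm : (find_english_words_alt text).Perm (pvFoundA text) :=
    (List.perm_ext_iff_of_nodup hndB (pvFoundA_nodup text)).mpr
      (fun p => (pvFoundB_mem text p).trans (pvFoundA_mem text p).symm)
  have hpl : (find_english_words_alt text).Pairwise
      (fun a b => (toLex a : Lex (Int × String)) < toLex b) := by
    refine hlex.imp ?_
    intro a b h
    exact Prod.Lex.lt_iff.mpr (by simpa using h)
  rw [find_english_words, pv_sorted2_eq_sorted_toLex,
    PySem.List.sorted_eq_of_perm_of_pairwise_lt _ _ _ hperm hpl]
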